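-- pv_equiv track=rewrite | github.com/GakkiBus/CFGrammarTool | CFGrammarTools.py | nullDerivables
-- ===== SOURCE A (Python) =====
-- def nullDerivables(nullables, alpha):
--     if alpha == ():
--         nullDrv = set()
--         nullDrv.add(tuple())
--         return nullDrv
--
--     nullDrv = nullDerivables(nullables, alpha[1:])
--     if alpha[0] in nullables:
--         return nullDrv.union(set(map(lambda t: (alpha[0],) + t, nullDrv)))
--     else:
--         return set(map(lambda t: (alpha[0],) + t, nullDrv))
-- ===== SOURCE B (Python) =====
-- def nullDerivables(nullables, alpha):
--     # Enumerate bitmasks over the nullable positions: bit 1 = keep the symbol,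
--     # bit 0 = drop it; non-nullable symbols are always kept.
--     m = sum(1 for s in alpha if s in nullables)
--     out = set()
--     for k in range(2 ** m):
--         t = []
--         b = m
--         for s in alpha:
--             if s in nullables:
--                 b -= 1
--                 if (k >> b) & 1:
--                     t.append(s)
--             else:
--                 t.append(s)
--         out.add(tuple(t))
--     return out
-- ===== Notes on version B (the rewrite author's own statement) =====
-- stated objective: alternative
-- what changed: Replaces the tail recursion with set unions by a direct bitmask enumeration: count the nullable occurrences m, then for each k in range(2**m) build one tuple in a single left-to-right scan keeping a nullable symbol iff its bit of k is set, adding each tuple to a result set.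
import Mathlib
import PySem

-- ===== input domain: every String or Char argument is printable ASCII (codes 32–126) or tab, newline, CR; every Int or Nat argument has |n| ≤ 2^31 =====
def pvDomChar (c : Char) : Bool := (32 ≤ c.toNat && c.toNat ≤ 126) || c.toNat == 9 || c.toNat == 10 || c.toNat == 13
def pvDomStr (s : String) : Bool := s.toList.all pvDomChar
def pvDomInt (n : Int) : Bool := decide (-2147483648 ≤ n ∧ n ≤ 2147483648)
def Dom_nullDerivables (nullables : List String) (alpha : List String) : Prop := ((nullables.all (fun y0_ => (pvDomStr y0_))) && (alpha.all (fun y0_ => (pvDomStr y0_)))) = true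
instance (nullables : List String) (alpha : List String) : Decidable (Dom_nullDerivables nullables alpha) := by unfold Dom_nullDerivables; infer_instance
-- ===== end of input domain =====

-- B replaces A's recursion-with-unions by a flat bitmask enumeration over the nullable
-- positions (objective: alternative algorithm of the same exponential cost).

-- ===== PORT A =====
-- literal port of the recursion: base case {()}, recurse on alpha[1:], prepend alpha[0]
def nullDerivables (nullables : List String) (alpha : List String) : List (List String) :=
  match alpha with
  | [] => PySem.Set.add PySem.Set.empty ([] : List String)
  | a :: rest =>
      let nullDrv := nullDerivables nullables rest
      if nullables.contains a then
        PySem.Set.union nullDrv (PySem.Set.ofList (nullDrv.map (fun t => a :: t)))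
      else
        PySem.Set.ofList (nullDrv.map (fun t => a :: t))

-- ===== PORT B =====
-- literal port of Source B: m = number of nullable symbols; for k in range(2**m) build one
-- tuple in a single scan (bit b of k decides whether the matching nullable symbol is kept).
-- b starts at m and is decremented once per nullable symbol, so b ≥ 0 throughout and
-- `k >> b` is ported as `k >>> b.toNat`; `2 ** m` with m ≥ 0 is ported as `2 ^ m.toNat`.
def nullDerivables_alt (nullables : List String) (alpha : List String) : List (List String) :=
  let m : Int := alpha.foldl (fun acc s => if nullables.contains s then acc + 1 else acc) 0
  (PySem.List.pyRange 0 ((2 : Int) ^ m.toNat)).foldl (fun out (k : Int) =>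
    let tb : List String × Int := alpha.foldl (fun (tb : List String × Int) s =>
      if nullables.contains s then
        let b := tb.2 - 1
        if PySem.Int.band (k >>> b.toNat) 1 ≠ 0 then (tb.1 ++ [s], b) else (tb.1, b)
      else (tb.1 ++ [s], tb.2)) ([], m)
    PySem.Set.add out tb.1) PySem.Set.empty

-- ===== PRECONDITION & SPEC =====
def Spec_nullDerivables (nullables : List String) (alpha : List String) (out : List (List String)) : Prop := out = nullDerivables_alt nullables alpha
instance (nullables : List String) (alpha : List String) (out : List (List String)) : Decidable (Spec_nullDerivables nullables alpha out) := by unfold Spec_nullDerivables; infer_instance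

-- ===== CLAIM (what is proved, stated in full; the proofs are below) =====
def Claim_equal_nullDerivables : Prop := ∀ (nullables : List String) (alpha : List String), Dom_nullDerivables nullables alpha → Spec_nullDerivables nullables alpha (nullDerivables nullables alpha)

-- ===== LEMMAS AND PROOFS =====

lemma pvUpdate_char {α : Type} [BEq α] [LawfulBEq α] (xs : List α) :
    ∀ s : PySem.Set α, PySem.Set.update s xs
      = s ++ (PySem.Set.ofList xs).filter (fun y => !(PySem.Set.contains s y)) := by
  induction xs with
  | nil => intro s; simp [PySem.Set.update, PySem.Set.ofList, PySem.Set.empty]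
  | cons x xs ih =>
    intro s
    have hcons : PySem.Set.ofList (x :: xs) = x :: (PySem.Set.ofList xs).filter (fun y => !(y == x)) := by
      have hof : PySem.Set.ofList (x :: xs) = PySem.Set.update ([x] : PySem.Set α) xs := by
        simp [PySem.Set.ofList, PySem.Set.update, PySem.Set.add, PySem.Set.empty, PySem.Set.contains]
      rw [hof, ih]
      simp [PySem.Set.contains]
    have hstep : PySem.Set.update s (x :: xs) = PySem.Set.update (PySem.Set.add s x) xs := by
      simp [PySem.Set.update]
    rw [hstep, ih, hcons]
    by_cases hx : PySem.Set.contains s x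
    · have hxm : x ∈ s := by simpa [PySem.Set.contains] using hx
      have hadd : PySem.Set.add s x = s := by simp [PySem.Set.add, PySem.Set.contains, hxm]
      rw [hadd]
      simp [PySem.Set.contains, hxm, List.filter_filter]
      apply List.filter_congr
      intro y hy
      by_cases hyx : y = x
      · subst hyx; simp [hxm]
      · simp [hyx]
    · have hxm : x ∉ s := by simpa [PySem.Set.contains] using hx
      have hadd : PySem.Set.add s x = s ++ [x] := by simp [PySem.Set.add, PySem.Set.contains, hxm]
      rw [hadd]
      simp [PySem.Set.contains, hxm, List.filter_filter, List.append_assoc]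
      apply List.filter_congr
      intro y hy
      by_cases hyx : y = x
      · subst hyx; simp
      · simp [hyx, Bool.and_comm]

lemma pvOfList_cons {α : Type} [BEq α] [LawfulBEq α] (x : α) (xs : List α) :
    PySem.Set.ofList (x :: xs) = x :: (PySem.Set.ofList xs).filter (fun y => !(y == x)) := by
  have hof : PySem.Set.ofList (x :: xs) = PySem.Set.update ([x] : PySem.Set α) xs := by
    simp [PySem.Set.ofList, PySem.Set.update, PySem.Set.add, PySem.Set.empty, PySem.Set.contains]
  rw [hof, pvUpdate_char]
  simp [PySem.Set.contains]

lemma pvOfList_nodup_self {α : Type} [BEq α] [LawfulBEq α] (xs : List α) (h : xs.Nodup) :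
    PySem.Set.ofList xs = xs := by
  induction xs with
  | nil => rfl
  | cons x xs ih =>
    rw [pvOfList_cons]
    rcases List.nodup_cons.mp h with ⟨hx, hnd⟩
    rw [List.filter_eq_self.mpr, ih hnd]
    intro y hy
    have : y ∈ xs := (PySem.Set.mem_ofList xs y).mp (by rw [ih hnd] at hy ⊢; exact hy)
    simp
    rintro rfl
    exact hx this

lemma pvOfList_idem {α : Type} [BEq α] [LawfulBEq α] (xs : List α) :
    PySem.Set.ofList (PySem.Set.ofList xs) = PySem.Set.ofList xs :=
  pvOfList_nodup_self _ (PySem.Set.nodup_ofList xs)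

lemma pvOfList_map_inj {α : Type} [BEq α] [LawfulBEq α] (f : α → α)
    (hf : ∀ a b, f a = f b → a = b) (xs : List α) :
    PySem.Set.ofList (xs.map f) = (PySem.Set.ofList xs).map f := by
  induction xs with
  | nil => rfl
  | cons x xs ih =>
    rw [List.map_cons, pvOfList_cons, pvOfList_cons, ih, List.map_cons, List.filter_map]
    refine congrArg (fun l => f x :: l) (congrArg (List.map f) (List.filter_congr ?_))
    intro y hy
    simp only [Function.comp]
    by_cases hyx : y = x
    · subst hyx; simp
    · simp [hyx]
      exact fun h => hyx (hf _ _ h)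

lemma pvUpdate_congr {α : Type} [BEq α] [LawfulBEq α] (s : PySem.Set α) (xs ys : List α)
    (h : PySem.Set.ofList xs = PySem.Set.ofList ys) :
    PySem.Set.update s xs = PySem.Set.update s ys := by
  rw [pvUpdate_char, pvUpdate_char, h]

def pvCnt (nullables : List String) (alpha : List String) : Nat :=
  alpha.countP (fun s => nullables.contains s)

def pvTup (nullables : List String) : List String → Nat → List String
  | [], _ => []
  | a :: r, n =>
      if nullables.contains a then
        (if n.testBit (pvCnt nullables r) then a :: pvTup nullables r n else pvTup nullables r n)
      else a :: pvTup nullables r n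

def pvSeq (nullables : List String) (alpha : List String) : List (List String) :=
  (List.range (2 ^ pvCnt nullables alpha)).map (pvTup nullables alpha)

lemma pvBit_iff (n b : Nat) :
    (PySem.Int.band ((n : Int) >>> b) 1 ≠ 0) ↔ n.testBit b = true := by
  rw [← Int.natCast_shiftRight]
  rw [show (1 : Int) = ((1 : Nat) : Int) from rfl, PySem.Int.band_natCast, Nat.and_one_is_mod,
      Nat.shiftRight_eq_div_pow]
  rcases Nat.mod_two_eq_zero_or_one (n / 2 ^ b) with h | h <;>
    simp [Nat.testBit, Nat.shiftRight_eq_div_pow, Nat.one_and_eq_mod_two, h]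

lemma pvTup_congr (nullables : List String) (r : List String) (n n' : Nat)
    (h : ∀ b < pvCnt nullables r, n.testBit b = n'.testBit b) :
    pvTup nullables r n = pvTup nullables r n' := by
  induction r with
  | nil => simp [pvTup]
  | cons a r ih =>
    by_cases ha : nullables.contains a
    · have ham : a ∈ nullables := by simpa using ha
      have hc : pvCnt nullables (a :: r) = pvCnt nullables r + 1 := by
        simp [pvCnt, List.countP_cons]; exact ham
      have hbit : n.testBit (pvCnt nullables r) = n'.testBit (pvCnt nullables r) :=
        h _ (by rw [hc]; omega)
      have hrec := ih (fun b hb => h b (by rw [hc]; omega))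
      simp [pvTup, ham, hbit, hrec]
    · have ham : a ∉ nullables := by simpa using ha
      have hc : pvCnt nullables (a :: r) = pvCnt nullables r := by
        simp [pvCnt, ham]
      have hrec := ih (fun b hb => h b (by rw [hc]; omega))
      simp [pvTup, ham, hrec]

lemma pvInner_fold (nullables : List String) (n : Nat) (alpha : List String) :
    ∀ t0 : List String,
      alpha.foldl (fun (tb : List String × Int) s =>
        if nullables.contains s then
          let b := tb.2 - 1
          if PySem.Int.band ((n : Int) >>> b.toNat) 1 ≠ 0 then (tb.1 ++ [s], b) else (tb.1, b)
        else (tb.1 ++ [s], tb.2)) (t0, (pvCnt nullables alpha : Int))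
      = (t0 ++ pvTup nullables alpha n, 0) := by
  induction alpha with
  | nil => intro t0; simp [pvCnt, pvTup]
  | cons a r ih =>
    intro t0
    by_cases ha : nullables.contains a
    · have ham : a ∈ nullables := by simpa using ha
      have hc : pvCnt nullables (a :: r) = pvCnt nullables r + 1 := by
        simp [pvCnt, List.countP_cons]; exact ham
      have hb : ((pvCnt nullables (a :: r) : Int)) - 1 = (pvCnt nullables r : Int) := by
        rw [hc]; push_cast; ring
      simp only [List.foldl_cons, ha, if_true, hb]
      by_cases hbit : n.testBit (pvCnt nullables r)
      · have hcond : PySem.Int.band ((n : Int) >>> ((pvCnt nullables r : Int)).toNat) 1 ≠ 0 := by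
          simpa using (pvBit_iff n (pvCnt nullables r)).mpr hbit
        rw [if_pos hcond]
        have htup : pvTup nullables (a :: r) n = a :: pvTup nullables r n := by
          simp [pvTup, ham, hbit]
        rw [htup]
        simpa using ih (t0 ++ [a])
      · have hbitf : n.testBit (pvCnt nullables r) = false := by
          simpa using hbit
        have hcond : ¬ (PySem.Int.band ((n : Int) >>> ((pvCnt nullables r : Int)).toNat) 1 ≠ 0) := by
          intro hcc
          rw [Int.toNat_natCast] at hcc
          exact hbit ((pvBit_iff n (pvCnt nullables r)).mp hcc)
        rw [if_neg hcond]
        have htup : pvTup nullables (a :: r) n = pvTup nullables r n := by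
          simp [pvTup, ham, hbitf]
        rw [htup]
        exact ih t0
    · have ham : a ∉ nullables := by simpa using ha
      have haf : nullables.contains a = false := by simpa using ha
      have hc : pvCnt nullables (a :: r) = pvCnt nullables r := by
        simp [pvCnt, ham]
      simp only [List.foldl_cons, haf, Bool.false_eq_true, if_false, hc]
      have htup : pvTup nullables (a :: r) n = a :: pvTup nullables r n := by
        simp [pvTup, ham]
      rw [htup]
      simpa using ih (t0 ++ [a])

lemma pvSeq_cons_not (nullables : List String) (a : String) (r : List String)
    (h : nullables.contains a = false) :
    pvSeq nullables (a :: r) = (pvSeq nullables r).map (fun t => a :: t) := by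
  have ham : a ∉ nullables := by simpa using h
  have hc : pvCnt nullables (a :: r) = pvCnt nullables r := by
    simp [pvCnt, ham]
  simp [pvSeq, hc, pvTup, ham, List.map_map, Function.comp]

lemma pvSeq_cons_null (nullables : List String) (a : String) (r : List String)
    (h : nullables.contains a = true) :
    pvSeq nullables (a :: r) = pvSeq nullables r ++ (pvSeq nullables r).map (fun t => a :: t) := by
  have ham : a ∈ nullables := by simpa using h
  have hc : pvCnt nullables (a :: r) = pvCnt nullables r + 1 := by
    simp [pvCnt, List.countP_cons]; exact ham
  have hpow : 2 ^ (pvCnt nullables r + 1) = 2 ^ pvCnt nullables r + 2 ^ pvCnt nullables r := by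
    rw [pow_succ]; ring
  rw [pvSeq, hc, hpow, List.range_add, List.map_append]
  congr 1
  · apply List.map_congr_left
    intro n hn
    have hlt : n < 2 ^ pvCnt nullables r := List.mem_range.mp hn
    have hbf : n.testBit (pvCnt nullables r) = false := Nat.testBit_lt_two_pow hlt
    simp [pvTup, ham, hbf]
  · rw [List.map_map, pvSeq, List.map_map]
    apply List.map_congr_left
    intro n hn
    have hlt : n < 2 ^ pvCnt nullables r := List.mem_range.mp hn
    have htop : (2 ^ pvCnt nullables r + n).testBit (pvCnt nullables r) = true := by
      rw [Nat.testBit_two_pow_add_eq, Nat.testBit_lt_two_pow hlt]; rfl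
    have hlow : pvTup nullables r (2 ^ pvCnt nullables r + n) = pvTup nullables r n := by
      apply pvTup_congr
      intro b hb
      exact Nat.testBit_two_pow_add_gt hb n
    simp [Function.comp, pvTup, ham, htop, hlow]

lemma pvA_main (nullables : List String) (alpha : List String) :
    nullDerivables nullables alpha = PySem.Set.ofList (pvSeq nullables alpha) := by
  induction alpha with
  | nil => rfl
  | cons a r ih =>
    have hinj : ∀ t u : List String, a :: t = a :: u → t = u := by
      intro t u h; injection h
    by_cases ha : nullables.contains a
    · rw [pvSeq_cons_null _ _ _ ha]
      have hA : nullDerivables nullables (a :: r)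
          = PySem.Set.update (nullDerivables nullables r)
              (PySem.Set.ofList ((nullDerivables nullables r).map (fun t => a :: t))) := by
        simp only [nullDerivables]
        rw [if_pos ha]
        rfl
      rw [hA, ih]
      have hofapp : PySem.Set.ofList (pvSeq nullables r ++ (pvSeq nullables r).map (fun t => a :: t))
          = PySem.Set.update (PySem.Set.ofList (pvSeq nullables r)) ((pvSeq nullables r).map (fun t => a :: t)) := by
        simp [PySem.Set.ofList, PySem.Set.update, List.foldl_append]
      rw [hofapp]
      have hmap : PySem.Set.ofList ((PySem.Set.ofList (pvSeq nullables r)).map (fun t => a :: t))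
          = PySem.Set.ofList ((pvSeq nullables r).map (fun t => a :: t)) := by
        rw [pvOfList_map_inj _ hinj, pvOfList_map_inj _ hinj, pvOfList_idem]
      rw [hmap]
      exact pvUpdate_congr _ _ _ (pvOfList_idem _)
    · have haf : nullables.contains a = false := by simpa using ha
      rw [pvSeq_cons_not _ _ _ haf]
      have hA : nullDerivables nullables (a :: r)
          = PySem.Set.ofList ((nullDerivables nullables r).map (fun t => a :: t)) := by
        simp only [nullDerivables]
        rw [if_neg ha]
      rw [hA, ih, pvOfList_map_inj _ hinj, pvOfList_map_inj _ hinj, pvOfList_idem]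

lemma pvB_main (nullables : List String) (alpha : List String) :
    nullDerivables_alt nullables alpha = PySem.Set.ofList (pvSeq nullables alpha) := by
  have h0 : ((0 : Int) + (alpha.countP (fun s => nullables.contains s) : Int))
      = (pvCnt nullables alpha : Int) := by simp [pvCnt]
  have hpow : ((2 : Int) ^ ((0 : Int) + (alpha.countP (fun s => nullables.contains s) : Int)).toNat)
      = ((2 ^ pvCnt nullables alpha : Nat) : Int) := by
    rw [h0]; push_cast; simp
  simp only [nullDerivables_alt, PySem.List.foldl_if_add_one, hpow]
  rw [PySem.List.pyRange_zero_natCast, List.foldl_map]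
  have hfun : (fun (out : List (List String)) (n : Nat) =>
      (fun out (k : Int) =>
        let tb : List String × Int := alpha.foldl (fun (tb : List String × Int) s =>
          if nullables.contains s then
            let b := tb.2 - 1
            if PySem.Int.band (k >>> b.toNat) 1 ≠ 0 then (tb.1 ++ [s], b) else (tb.1, b)
          else (tb.1 ++ [s], tb.2)) ([], (0 : Int) + (alpha.countP (fun s => nullables.contains s) : Int))
        PySem.Set.add out tb.1) out (n : Int))
      = (fun out n => PySem.Set.add out (pvTup nullables alpha n)) := by
    funext out n
    simp only [h0, pvInner_fold, List.nil_append]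
  rw [hfun]
  show (List.range (2 ^ pvCnt nullables alpha)).foldl
      (fun out n => PySem.Set.add out (pvTup nullables alpha n)) PySem.Set.empty
    = PySem.Set.ofList (pvSeq nullables alpha)
  rw [pvSeq, PySem.Set.ofList, ← List.foldl_map]

-- ===== VERDICT (by name: the statement is the Claim_ definition above) =====
theorem nullDerivables_spec : Claim_equal_nullDerivables := by
  intro nullables alpha _
  unfold Spec_nullDerivables
  rw [pvA_main, pvB_main]
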